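-- pv_equiv track=rewrite | github.com/kirillsats/INDEKS | Oleinik/PalgadModul.py | kellel_on_vaiksem_palk
-- ===== SOURCE A (Python) =====
-- def kellel_on_vaiksem_palk(i: list, p: list)->list:
--     """Fumktisoon, mis näitab kellel on väiksem palk
--
--     :param i:Inimeste järjend
--     :param p:Palgate järjend
--     :rtype: List, list
--     """
--     nimed=[]
--     minimaalne = min(p)
--     ind = -1
--     for palk in p:
--         if palk == minimaalne:
--             ind += 1
--             nimi = i[p.index(palk,ind)]
--             nimed.append(nimi)
--     return nimed
-- ===== SOURCE B (Python) =====
-- def kellel_on_vaiksem_palk(i: list, p: list) -> list: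
--     """Names of everyone earning the minimum salary, in one pass."""
--     minimaalne = min(p)
--     return [i[k] for k, palk in enumerate(p) if palk == minimaalne]
-- ===== Notes on version B (the rewrite author's own statement) =====
-- stated objective: simpler
-- what changed: A rescans p with p.index(palk, hit_counter) for every hit of the minimum; B is a single enumerate pass collecting i[k] at each minimum position. Pre_ excludes inputs where either program raises: empty p (min raises ValueError) and inputs where some minimum position is >= len(i) (B's i[k] raises IndexError there; A sometimes returns on such inputs, see cites).
-- intended difference: When the minimum occurs more than once and its occurrences are not prefix-aligned, A's counter-based p.index(palk, ind) re-reads an earlier minimum position and returns a repeated name (e.g. ['b','b'] on (['a','b','c'],[2,1,1])) where B returns the name at each minimum position (['b','c']), which is what the function is for; D_ holds exactly when some such re-read name differs from the intended one. — e.g. on kellel_on_vaiksem_palk(["a", "b", "c"], [2, 1, 1]): A returns ["b", "b"], B returns ["b", "c"]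
-- outside the precondition, e.g. on kellel_on_vaiksem_palk(['a', 'b', 'c', 'd', 'e'], [1, 9, 9, 9, 1, 1]): A returns ['a', 'e', 'e'], B raises IndexError; on kellel_on_vaiksem_palk([], []): A raises ValueError, B raises ValueError
import Mathlib
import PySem

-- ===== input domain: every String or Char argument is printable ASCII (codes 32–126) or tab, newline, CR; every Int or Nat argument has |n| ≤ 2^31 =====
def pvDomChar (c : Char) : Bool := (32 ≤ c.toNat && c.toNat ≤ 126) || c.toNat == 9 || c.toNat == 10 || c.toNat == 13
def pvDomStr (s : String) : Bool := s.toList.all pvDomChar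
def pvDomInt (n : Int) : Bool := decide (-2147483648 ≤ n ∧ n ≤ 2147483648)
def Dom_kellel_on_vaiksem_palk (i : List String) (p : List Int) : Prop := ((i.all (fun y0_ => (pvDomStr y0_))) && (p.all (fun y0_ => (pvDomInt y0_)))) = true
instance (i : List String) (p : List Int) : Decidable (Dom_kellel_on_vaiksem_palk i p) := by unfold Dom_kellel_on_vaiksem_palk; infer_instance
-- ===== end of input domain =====

-- B replaces A's counter-plus-p.index rescans by a single enumerate pass over p
-- (objective: simpler); where A's counter re-hits an earlier minimum position and
-- repeats a name, B returns the name at each minimum position (see D_ below).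

-- ===== PORT A =====
-- hand port of Python's list.index(v, start) (PySem.List.index? has no start argument):
-- first index ≥ start holding v, none = ValueError.  A only calls it with start ≥ 0, where
-- CPython scans from position start; the clamp of a negative start to 0 is exact there.
def pyIndexFrom (xs : List Int) (v : Int) (start : Int) : Option Nat :=
  let s : Nat := (max start 0).toNat
  ((xs.drop s).idxOf? v).map (fun k => s + k)

-- A's loop body: update the state (ind, nimed) for one palk
def pvStep (i : List String) (p : List Int) (minimaalne : Int)
    (st : Int × List String) (palk : Int) : Int × List String :=
  if palk = minimaalne then
    let ind := st.1 + 1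
    match pyIndexFrom p palk ind with
    | some k => (ind, st.2 ++ [PySem.List.pyGetD i (k : Int) ""])
        -- i[...] out of range raises IndexError: excluded by Pre_
    | none => (ind, st.2)   -- list.index ValueError: unreachable (palk = min occurs at a position ≥ ind)
  else st

def kellel_on_vaiksem_palk (i : List String) (p : List Int) : List String :=
  match PySem.List.min? p (fun x => x) with
  | none => []        -- min([]) raises ValueError: excluded by Pre_
  | some minimaalne => (p.foldl (pvStep i p minimaalne) (-1, [])).2

-- ===== PORT B =====
def kellel_on_vaiksem_palk_alt (i : List String) (p : List Int) : List String :=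
  match PySem.List.min? p (fun x => x) with
  | none => []        -- min([]) raises ValueError: excluded by Pre_
  | some minimaalne =>
    ((PySem.List.enumerate p 0).filter (fun kp => kp.2 == minimaalne)).map
      (fun kp => PySem.List.pyGetD i kp.1 "")
      -- i[k] out of range raises IndexError: excluded by Pre_

-- ===== PRECONDITION & SPEC =====
-- Pre_ excludes inputs on which a program raises: empty p (min raises ValueError in both)
-- and inputs where some minimum position is ≥ len(i) — there B's i[k] raises IndexError
-- (A also raises on most of them, but can return when its counter never reaches the
-- out-of-range position: see the cite in claim.json).
def Pre_kellel_on_vaiksem_palk (i : List String) (p : List Int) : Prop :=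
  p ≠ [] ∧ ∀ k : Nat, k < p.length → (∀ x ∈ p, p.getD k 0 ≤ x) → k < i.length
instance (i : List String) (p : List Int) : Decidable (Pre_kellel_on_vaiksem_palk i p) := by
  unfold Pre_kellel_on_vaiksem_palk; infer_instance

def pvWitness_kellel_on_vaiksem_palk : List String × List Int := (["a", "b"], [2, 1])

-- When the minimum occurs more than once and A's counter-based p.index(palk, ind) re-hits
-- an earlier minimum position whose name differs from the one at the j-th minimum position,
-- A returns that repeated name while B returns the name at each minimum position, which is
-- the function's purpose ("who earns the minimum salary").
def D_kellel_on_vaiksem_palk (i : List String) (p : List Int) : Prop :=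
  ∃ j : Nat, j < p.countP (fun x => decide (∀ y ∈ p, x ≤ y)) ∧
  ∃ a : Nat, a < p.length ∧
  ∃ b : Nat, b < p.length ∧
    j ≤ a ∧ (∀ y ∈ p, p.getD a 0 ≤ y) ∧
    (∀ r : Nat, r < a → j ≤ r → ¬(∀ y ∈ p, p.getD r 0 ≤ y)) ∧
    (∀ y ∈ p, p.getD b 0 ≤ y) ∧
    (p.take b).countP (fun x => decide (∀ y ∈ p, x ≤ y)) = j ∧
    i.getD a "" ≠ i.getD b ""
instance (i : List String) (p : List Int) : Decidable (D_kellel_on_vaiksem_palk i p) := by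
  unfold D_kellel_on_vaiksem_palk; infer_instance

def Spec_kellel_on_vaiksem_palk (i : List String) (p : List Int) (out : List String) : Prop :=
  ¬ D_kellel_on_vaiksem_palk i p → out = kellel_on_vaiksem_palk_alt i p
instance (i : List String) (p : List Int) (out : List String) : Decidable (Spec_kellel_on_vaiksem_palk i p out) := by
  unfold Spec_kellel_on_vaiksem_palk; infer_instance

def pvDiffWitness_kellel_on_vaiksem_palk : List String × List Int := (["a", "b", "c"], [2, 1, 1])
def pvDiffWitnessOut_kellel_on_vaiksem_palk : (List String) × (List String) := (["b", "b"], ["b", "c"])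

-- ===== CLAIM (what is proved, stated in full; the proofs are below) =====
def Claim_unchanged_kellel_on_vaiksem_palk : Prop := ∀ (i : List String) (p : List Int), Dom_kellel_on_vaiksem_palk i p → Pre_kellel_on_vaiksem_palk i p → Spec_kellel_on_vaiksem_palk i p (kellel_on_vaiksem_palk i p)
def Claim_changed_kellel_on_vaiksem_palk : Prop := Dom_kellel_on_vaiksem_palk (pvDiffWitness_kellel_on_vaiksem_palk.1) (pvDiffWitness_kellel_on_vaiksem_palk.2) ∧ Pre_kellel_on_vaiksem_palk (pvDiffWitness_kellel_on_vaiksem_palk.1) (pvDiffWitness_kellel_on_vaiksem_palk.2) ∧ D_kellel_on_vaiksem_palk (pvDiffWitness_kellel_on_vaiksem_palk.1) (pvDiffWitness_kellel_on_vaiksem_palk.2) ∧ kellel_on_vaiksem_palk (pvDiffWitness_kellel_on_vaiksem_palk.1) (pvDiffWitness_kellel_on_vaiksem_palk.2) = pvDiffWitnessOut_kellel_on_vaiksem_palk.1 ∧ kellel_on_vaiksem_palk_alt (pvDiffWitness_kellel_on_vaiksem_palk.1) (pvDiffWitness_kellel_on_vaiksem_palk.2) = pvDiffWitnessOut_kellel_on_vaiksem_palk.2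 ∧ pvDiffWitnessOut_kellel_on_vaiksem_palk.1 ≠ pvDiffWitnessOut_kellel_on_vaiksem_palk.2
def Claim_exact_kellel_on_vaiksem_palk : Prop := ∀ (i : List String) (p : List Int), Dom_kellel_on_vaiksem_palk i p → Pre_kellel_on_vaiksem_palk i p → D_kellel_on_vaiksem_palk i p → kellel_on_vaiksem_palk i p ≠ kellel_on_vaiksem_palk_alt i p

-- ===== LEMMAS AND PROOFS =====

-- the per-hit contribution of A's loop body, as a function of the counter value
def pvG (i : List String) (p : List Int) (m : Int) (n : Nat) : List String :=
  match pyIndexFrom p m (n : Int) with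
  | some k => [PySem.List.pyGetD i (k : Int) ""]
  | none => []

-- "k is the first position ≥ j holding m"
def pvGood (p : List Int) (m : Int) (j k : Nat) : Prop :=
  p.getD k 0 = m ∧ j ≤ k ∧ k < p.length ∧ ∀ r, j ≤ r → r < k → p.getD r 0 ≠ m

-- the canonical index A's j-th appended name reads from
def pvF (p : List Int) (m : Int) (j : Nat) : Nat := (pyIndexFrom p m (j : Int)).getD 0

-- the list of minimum positions B filters out, named for the proofs
def pvPos (p : List Int) (m : Int) : List Int :=
  ((PySem.List.enumerate p 0).filter (fun kp => kp.2 == m)).map (fun kp => kp.1)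

-- A's loop, run from counter value n - 1: one pvG block per occurrence of m
theorem pvA_foldl (i : List String) (p : List Int) (m : Int) :
    ∀ (l : List Int) (n : Nat) (acc : List String),
      l.foldl (pvStep i p m) ((n : Int) - 1, acc)
      = ((n : Int) + l.count m - 1, acc ++ (List.range' n (l.count m)).flatMap (pvG i p m)) := by
  intro l
  induction l with
  | nil => intro n acc; simp
  | cons x t ih =>
    intro n acc
    simp only [List.foldl_cons]
    by_cases hx : x = m
    · have hstep : pvStep i p m ((n : Int) - 1, acc) x
          = (((n + 1 : Nat) : Int) - 1, acc ++ pvG i p m n) := by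
        unfold pvStep
        rw [if_pos hx, hx]
        show (match pyIndexFrom p m (((n : Int) - 1) + 1) with
          | some k => (((n : Int) - 1) + 1, acc ++ [PySem.List.pyGetD i (k : Int) ""])
          | none => (((n : Int) - 1) + 1, acc))
          = (((n + 1 : Nat) : Int) - 1, acc ++ pvG i p m n)
        rw [sub_add_cancel]
        cases h : pyIndexFrom p m (n : Int) <;>
          simp only [pvG, h, Prod.mk.injEq, List.append_nil] <;>
          exact ⟨by push_cast; ring, trivial⟩
      rw [hstep, ih (n + 1) (acc ++ pvG i p m n)]
      have hcnt : (m :: t).count m = t.count m + 1 := by simp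
      rw [hx, hcnt]
      simp only [Prod.mk.injEq]
      refine ⟨by push_cast; ring, ?_⟩
      rw [List.range'_succ, List.flatMap_cons, List.append_assoc]
    · have hstep : pvStep i p m ((n : Int) - 1, acc) x = ((n : Int) - 1, acc) := by
        unfold pvStep; rw [if_neg hx]
      rw [hstep, List.count_cons, if_neg (by exact fun h => hx (by simpa using h))]
      simpa using ih n acc

theorem pvFlatMap_singleton {α β : Type} (l : List α) (f : α → List β) (g : α → β)
    (h : ∀ j ∈ l, f j = [g j]) : l.flatMap f = l.map g := by
  induction l with
  | nil => simp
  | cons x t ih =>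
    rw [List.flatMap_cons, List.map_cons, h x (by simp),
      ih (fun j hj => h j (List.mem_cons_of_mem _ hj))]
    simp

theorem pvGood_unique (p : List Int) (m : Int) (j k k' : Nat)
    (h : pvGood p m j k) (h' : pvGood p m j k') : k = k' := by
  obtain ⟨hm, hjk, hkl, hfirst⟩ := h
  obtain ⟨hm', hjk', hkl', hfirst'⟩ := h'
  rcases Nat.lt_trichotomy k k' with hlt | heq | hgt
  · exact absurd hm (hfirst' k hjk hlt)
  · exact heq
  · exact absurd hm' (hfirst k' hjk' hgt)

theorem pvIdx_found (p : List Int) (m : Int) (j : Nat) (hj : j < p.count m) :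
    ∃ k, pyIndexFrom p m (j : Int) = some k ∧ pvGood p m j k := by
  have hs : ((max (j : Int) 0).toNat) = j := by omega
  have hsplit : p.count m = (p.take j).count m + (p.drop j).count m := by
    rw [← List.count_append, List.take_append_drop]
  have htk : (p.take j).count m ≤ j := by
    calc (p.take j).count m ≤ (p.take j).length := List.count_le_length
    _ ≤ j := by simp [List.length_take]
  have hmem : m ∈ p.drop j := by
    rw [← List.one_le_count_iff]; omega
  obtain ⟨d, hd⟩ := Option.isSome_iff_exists.mp ((PySem.List.index?_isSome_iff _ _).mpr hmem)
  obtain ⟨hdlen, hdm, hprev⟩ := PySem.List.getElem_of_index?_eq_some hd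
  have hdrop : (p.drop j).idxOf? m = some d := by
    rw [← PySem.List.index?_eq_idxOf?]; exact hd
  have hlen : j + d < p.length := by
    have := List.length_drop (l := p) (i := j)
    omega
  refine ⟨j + d, ?_, ?_, by omega, hlen, ?_⟩
  · simp [pyIndexFrom, hdrop]
  · rw [List.getD_eq_getElem p 0 hlen, ← List.getElem_drop]
    exact hdm
  · intro r hjr hrk
    have hr : r - j < d := by omega
    have hrlen : r < p.length := by omega
    rw [List.getD_eq_getElem p 0 hrlen]
    have := hprev (r - j) hr
    rw [List.getElem_drop] at this
    have hrj : j + (r - j) = r := by omega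
    simpa [hrj] using this

theorem pvPos_mem (p : List Int) (m : Int) (x : Int) :
    x ∈ pvPos p m ↔ ∃ k : Nat, k < p.length ∧ x = (k : Int) ∧ p.getD k 0 = m := by
  unfold pvPos
  simp only [List.mem_map, List.mem_filter, beq_iff_eq]
  constructor
  · rintro ⟨kp, ⟨hmem, hsnd⟩, rfl⟩
    rw [PySem.List.mem_enumerate_iff] at hmem
    obtain ⟨k, hk, rfl⟩ := hmem
    exact ⟨k, hk, by simp, by rw [List.getD_eq_getElem p 0 hk]; simpa using hsnd⟩
  · rintro ⟨k, hk, rfl, hm⟩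
    refine ⟨((k : Int), p[k]), ⟨?_, ?_⟩, rfl⟩
    · rw [PySem.List.mem_enumerate_iff]
      exact ⟨k, hk, by simp⟩
    · rw [List.getD_eq_getElem p 0 hk] at hm; simpa using hm

theorem pvPos_pairwise (p : List Int) (m : Int) : (pvPos p m).Pairwise (· < ·) := by
  unfold pvPos
  exact List.Pairwise.map _ (fun a b h => h)
    (List.Pairwise.filter _ (PySem.List.pairwise_lt_enumerate p 0))

theorem pvPos_nodup (p : List Int) (m : Int) : (pvPos p m).Nodup :=
  (pvPos_pairwise p m).imp (fun h => ne_of_lt h)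

theorem pvPos_length (p : List Int) (m : Int) : (pvPos p m).length = p.count m := by
  unfold pvPos
  rw [List.length_map]
  have : ∀ (s : Int), ((PySem.List.enumerate p s).filter (fun kp => kp.2 == m)).length
      = p.count m := by
    induction p with
    | nil => intro s; simp [PySem.List.enumerate_nil]
    | cons x t ih =>
      intro s
      rw [PySem.List.enumerate_cons, List.filter_cons, List.count_cons]
      by_cases hx : x = m
      · simp [hx, ih (s + 1)]
      · simp [hx, ih (s + 1)]
  exact this 0

-- with m = min(p): isMin x ↔ x = m (pointwise form)
theorem pvIsMin_iff (p : List Int) (m : Int) (hmem : m ∈ p) (hmin : ∀ y ∈ p, m ≤ y)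
    (k : Nat) (hk : k < p.length) : (∀ y ∈ p, p.getD k 0 ≤ y) ↔ p.getD k 0 = m := by
  have hxm : p.getD k 0 ∈ p := by
    rw [List.getD_eq_getElem p 0 hk]; exact List.getElem_mem hk
  exact ⟨fun h => le_antisymm (h m hmem) (hmin _ hxm), fun h => h ▸ hmin⟩

-- with m = min(p): countP over isMin is count of m, on any sublist of p
theorem pvCountP_isMin (p l : List Int) (m : Int) (hmem : m ∈ p) (hmin : ∀ y ∈ p, m ≤ y)
    (hsub : ∀ x ∈ l, x ∈ p) :
    l.countP (fun x => decide (∀ y ∈ p, x ≤ y)) = l.count m := by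
  rw [List.count, List.countP_congr]
  intro x hx
  have hiff : (∀ y ∈ p, x ≤ y) ↔ x = m :=
    ⟨fun h => le_antisymm (h m hmem) (hmin x (hsub x hx)), fun h => h ▸ hmin⟩
  simp [hiff]

theorem pvCountP_split (l : List Int) (t : Nat) :
    l.countP (fun x => decide (x < (t : Int) + 1))
      = l.countP (fun x => decide (x < (t : Int))) + l.countP (fun x => decide (x = (t : Int))) := by
  induction l with
  | nil => simp
  | cons x l ih =>
    simp only [List.countP_cons, ih]
    by_cases h1 : x < (t : Int)
    · have h2 : x < (t : Int) + 1 := by omega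
      have h3 : ¬ x = (t : Int) := by omega
      simp [h1, h2, h3]
      omega
    · by_cases h2 : x = (t : Int)
      · have h3 : x < (t : Int) + 1 := by omega
        simp [h2]
        omega
      · have h3 : ¬ x < (t : Int) + 1 := by omega
        simp [h1, h2, h3]

theorem pvCountP_eq_single (p : List Int) (m : Int) (t : Nat) (ht : t < p.length) :
    (pvPos p m).countP (fun x => decide (x = (t : Int)))
      = if p.getD t 0 = m then 1 else 0 := by
  have hcnt : (pvPos p m).countP (fun x => decide (x = (t : Int)))
      = (pvPos p m).count ((t : Int)) := by
    rw [List.count]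
    apply List.countP_congr
    intro x _
    rw [Bool.eq_iff_iff]
    simp
  rw [hcnt]
  by_cases hm : p.getD t 0 = m
  · have hmem : ((t : Int)) ∈ pvPos p m := (pvPos_mem p m _).mpr ⟨t, ht, rfl, hm⟩
    have h1 : 1 ≤ (pvPos p m).count ((t : Int)) := List.one_le_count_iff.mpr hmem
    have h2 : (pvPos p m).count ((t : Int)) ≤ 1 :=
      List.nodup_iff_count_le_one.mp (pvPos_nodup p m) _
    rw [if_pos hm]; omega
  · have hnm : ((t : Int)) ∉ pvPos p m := by
      intro h
      obtain ⟨k, hk, he, hkm⟩ := (pvPos_mem p m _).mp h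
      have : t = k := by exact_mod_cast he
      exact hm (this ▸ hkm)
    rw [if_neg hm, List.count_eq_zero.mpr hnm]

-- counting m among the first t salaries = counting minimum positions below t
theorem pvCount_take (p : List Int) (m : Int) :
    ∀ t : Nat, t ≤ p.length →
      (p.take t).count m = (pvPos p m).countP (fun x => decide (x < (t : Int))) := by
  intro t
  induction t with
  | zero =>
    intro _
    rw [List.take_zero, List.count_nil]
    symm
    rw [List.countP_eq_zero]
    intro x hx
    obtain ⟨k, _, rfl, _⟩ := (pvPos_mem p m x).mp hx
    simp
  | succ t ih =>
    intro h
    have ht : t < p.length := by omega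
    rw [List.take_add_one, List.getElem?_eq_getElem ht, List.count_append]
    have hcast : ((t + 1 : Nat) : Int) = (t : Int) + 1 := by push_cast; ring
    rw [hcast, pvCountP_split, ← ih (by omega), pvCountP_eq_single p m t ht]
    have hsing : ((some p[t]).toList).count m = if p.getD t 0 = m then 1 else 0 := by
      rw [List.getD_eq_getElem p 0 ht]
      by_cases hx : p[t] = m <;> simp [hx]
    rw [hsing]

-- in the strictly increasing list pvPos, s elements lie below the s-th one
theorem pvCountP_lt_getElem (p : List Int) (m : Int) (s : Nat) (hs : s < (pvPos p m).length) :
    (pvPos p m).countP (fun x => decide (x < (pvPos p m)[s])) = s := by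
  have hsplit := List.take_append_drop s (pvPos p m)
  calc (pvPos p m).countP (fun x => decide (x < (pvPos p m)[s]))
      = ((pvPos p m).take s ++ (pvPos p m).drop s).countP
          (fun x => decide (x < (pvPos p m)[s])) := by rw [hsplit]
    _ = s := by
        rw [List.countP_append]
        have h1 : ((pvPos p m).take s).countP (fun x => decide (x < (pvPos p m)[s]))
            = ((pvPos p m).take s).length := by
          rw [List.countP_eq_length]
          intro x hx
          rw [List.mem_iff_getElem] at hx
          obtain ⟨r, hr, rfl⟩ := hx
          have hrs : r < s := by
            have := hr
            rw [List.length_take] at this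
            omega
          rw [List.getElem_take]
          simpa using (List.pairwise_iff_getElem).mp (pvPos_pairwise p m) r s (by omega) hs hrs
        have h2 : ((pvPos p m).drop s).countP (fun x => decide (x < (pvPos p m)[s])) = 0 := by
          rw [List.countP_eq_zero]
          intro x hx
          rw [List.mem_iff_getElem] at hx
          obtain ⟨r, hr, rfl⟩ := hx
          rw [List.getElem_drop]
          rcases Nat.eq_zero_or_pos r with h0 | h0
          · subst h0; simp
          · have hlt := (List.pairwise_iff_getElem).mp (pvPos_pairwise p m) s (s + r)
              hs (by rw [List.length_drop] at hr; omega) (by omega)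
            simp only [decide_eq_true_eq]
            omega
        rw [h1, h2, List.length_take]
        have := pvPos_length p m
        omega

-- the s-th minimum position has exactly s occurrences of m before it
theorem pvTakeCount (p : List Int) (m : Int) (s : Nat) (hs : s < (pvPos p m).length) :
    (p.take (((pvPos p m)[s]).toNat)).count m = s := by
  obtain ⟨kk, hkklen, hkkeq, _⟩ := (pvPos_mem p m _).mp (List.getElem_mem hs)
  have htn : ((pvPos p m)[s]).toNat = kk := by rw [hkkeq]; simp
  rw [htn, pvCount_take p m kk (by omega)]
  have : ((kk : Nat) : Int) = (pvPos p m)[s] := hkkeq.symm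
  rw [this]
  exact pvCountP_lt_getElem p m s hs

-- uniqueness: a minimum position with exactly j earlier occurrences is pvPos[j]
theorem pvOcc_unique (p : List Int) (m : Int) (j b : Nat) (hb : b < p.length)
    (hbm : p.getD b 0 = m) (hcnt : (p.take b).count m = j) (hj : j < (pvPos p m).length) :
    (pvPos p m)[j] = (b : Int) := by
  have hmem : ((b : Int)) ∈ pvPos p m := (pvPos_mem p m _).mpr ⟨b, hb, rfl, hbm⟩
  rw [List.mem_iff_getElem] at hmem
  obtain ⟨s, hs, hseq⟩ := hmem
  have htc := pvTakeCount p m s hs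
  have hbn : ((pvPos p m)[s]).toNat = b := by rw [hseq]; simp
  rw [hbn, hcnt] at htc
  have hsj : s = j := htc.symm
  subst hsj
  exact hseq

-- A's result in normal form: one name per counter value j, read from index pvF j
theorem pvA_norm (i : List String) (p : List Int) (m : Int)
    (hmin : PySem.List.min? p (fun x => x) = some m) :
    kellel_on_vaiksem_palk i p
      = (List.range' 0 (p.count m)).map
          (fun j => PySem.List.pyGetD i ((pvF p m j : Nat) : Int) "") := by
  unfold kellel_on_vaiksem_palk
  rw [hmin]
  show (p.foldl (pvStep i p m) (-1, [])).2 = _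
  have h0 : (-1 : Int) = ((0 : Nat) : Int) - 1 := by norm_num
  rw [h0, pvA_foldl i p m p 0 []]
  dsimp only
  rw [List.nil_append]
  apply pvFlatMap_singleton
  intro j hj
  rw [List.mem_range'_1] at hj
  obtain ⟨k, hk, _⟩ := pvIdx_found p m j (by omega)
  have hF : pvF p m j = k := by unfold pvF; rw [hk]; rfl
  unfold pvG
  rw [hk]
  dsimp only
  rw [hF]

-- B's result in normal form: one name per minimum position
theorem pvB_norm (i : List String) (p : List Int) (m : Int)
    (hmin : PySem.List.min? p (fun x => x) = some m) :
    kellel_on_vaiksem_palk_alt i p = (pvPos p m).map (fun x => PySem.List.pyGetD i x "") := by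
  unfold kellel_on_vaiksem_palk_alt
  rw [hmin]
  show ((PySem.List.enumerate p 0).filter (fun kp => kp.2 == m)).map
      (fun kp => PySem.List.pyGetD i kp.1 "") = _
  unfold pvPos
  rw [List.map_map]
  rfl

-- ===== VERDICT (by name: the statement is the Claim_ definition above) =====
theorem kellel_on_vaiksem_palk_spec : Claim_unchanged_kellel_on_vaiksem_palk := by
  intro i p _hDom _hPre hD
  show kellel_on_vaiksem_palk i p = kellel_on_vaiksem_palk_alt i p
  cases hmin : PySem.List.min? p (fun x => x) with
  | none =>
    unfold kellel_on_vaiksem_palk kellel_on_vaiksem_palk_alt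
    rw [hmin]
  | some m =>
    have hmem : m ∈ p := PySem.List.min?_mem hmin
    have hismin : ∀ y ∈ p, m ≤ y := by
      have := PySem.List.min?_isMin hmin
      simpa using this
    have hcntP : p.countP (fun x => decide (∀ y ∈ p, x ≤ y)) = p.count m :=
      pvCountP_isMin p p m hmem hismin (fun x hx => hx)
    rw [pvA_norm i p m hmin, pvB_norm i p m hmin]
    apply List.ext_getElem
    · rw [List.length_map, List.length_map, List.length_range', pvPos_length]
    · intro j h1 h2
      have hj : j < p.count m := by
        rw [List.length_map, List.length_range'] at h1; exact h1
      have hjks : j < (pvPos p m).length := by rw [pvPos_length]; exact hj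
      rw [List.getElem_map, List.getElem_map, List.getElem_range']
      simp only [Nat.zero_add, Nat.one_mul]
      obtain ⟨kk, hkklen, hkkeq, hkkm⟩ := (pvPos_mem p m _).mp (List.getElem_mem hjks)
      obtain ⟨kf, hk, hkgood⟩ := pvIdx_found p m j hj
      have hF : pvF p m j = kf := by unfold pvF; rw [hk]; rfl
      obtain ⟨hkm2, hkj2, hklen2, hkfirst2⟩ := hkgood
      have hnames : i.getD kf "" = i.getD kk "" := by
        by_contra hne
        apply hD
        refine ⟨j, by rw [hcntP]; exact hj, kf, hklen2, kk, hkklen,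
          hkj2, (pvIsMin_iff p m hmem hismin kf hklen2).mpr hkm2, ?_,
          (pvIsMin_iff p m hmem hismin kk hkklen).mpr hkkm, ?_, hne⟩
        · intro r hra hjr
          rw [pvIsMin_iff p m hmem hismin r (by omega)]
          exact hkfirst2 r hjr hra
        · rw [pvCountP_isMin p (p.take kk) m hmem hismin (fun x hx => List.mem_of_mem_take hx)]
          have hkkn : ((pvPos p m)[j]).toNat = kk := by rw [hkkeq]; simp
          rw [← hkkn]
          exact pvTakeCount p m j hjks
      rw [hF, hkkeq]
      rw [PySem.List.pyGetD_natCast, PySem.List.pyGetD_natCast]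
      exact hnames

theorem kellel_on_vaiksem_palk_changed : Claim_changed_kellel_on_vaiksem_palk := by
  unfold Claim_changed_kellel_on_vaiksem_palk; decide

theorem kellel_on_vaiksem_palk_tight : Claim_exact_kellel_on_vaiksem_palk := by
  intro i p _hDom _hPre hD
  obtain ⟨j, hjc, a, ha, b, hb, hja, haminP, hafirst, hbminP, hbcntP, hne⟩ := hD
  cases hmin : PySem.List.min? p (fun x => x) with
  | none =>
    exfalso
    have : p = [] := (PySem.List.min?_eq_none_iff p _).mp hmin
    subst this
    simp at hjc
  | some m =>
    have hmem : m ∈ p := PySem.List.min?_mem hmin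
    have hismin : ∀ y ∈ p, m ≤ y := by
      have := PySem.List.min?_isMin hmin
      simpa using this
    have hcntP : p.countP (fun x => decide (∀ y ∈ p, x ≤ y)) = p.count m :=
      pvCountP_isMin p p m hmem hismin (fun x hx => hx)
    have hj : j < p.count m := by rw [← hcntP]; exact hjc
    have hjks : j < (pvPos p m).length := by rw [pvPos_length]; exact hj
    have haM : p.getD a 0 = m := (pvIsMin_iff p m hmem hismin a ha).mp haminP
    have hbM : p.getD b 0 = m := (pvIsMin_iff p m hmem hismin b hb).mp hbminP
    have hGa : pvGood p m j a := by
      refine ⟨haM, hja, ha, ?_⟩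
      intro r h1 h2
      have := hafirst r h2 h1
      rw [pvIsMin_iff p m hmem hismin r (by omega)] at this
      exact this
    obtain ⟨kf, hk, hkgood⟩ := pvIdx_found p m j hj
    have hFa : pvF p m j = a := by
      unfold pvF
      rw [hk]
      exact pvGood_unique p m j kf a hkgood hGa
    have hbcnt : (p.take b).count m = j := by
      rw [← pvCountP_isMin p (p.take b) m hmem hismin (fun x hx => List.mem_of_mem_take hx)]
      exact hbcntP
    have hksb : (pvPos p m)[j] = (b : Int) := pvOcc_unique p m j b hb hbM hbcnt hjks
    intro hAB
    rw [pvA_norm i p m hmin, pvB_norm i p m hmin] at hAB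
    have h1 : j < ((List.range' 0 (p.count m)).map
        (fun j => PySem.List.pyGetD i ((pvF p m j : Nat) : Int) "")).length := by
      rw [List.length_map, List.length_range']; exact hj
    have hel := List.getElem_of_eq hAB (i := j) h1
    rw [List.getElem_map, List.getElem_map, List.getElem_range'] at hel
    simp only [Nat.zero_add, Nat.one_mul] at hel
    rw [hFa, hksb, PySem.List.pyGetD_natCast, PySem.List.pyGetD_natCast] at hel
    exact hne hel
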